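-- pv_equiv track=rewrite | github.com/ayushbhatta1/NBA-PLAYER-PREDICTION | predictions/pregame_check.py | _find_game_key
-- ===== SOURCE A (Python) =====
-- def _find_game_key(player, game_str, GAMES):
--     """Find the GAMES dict key for a player's game."""
--     # Try direct match on game string
--     if game_str and game_str in GAMES:
--         return game_str
--
--     # Try matching by looking through all games
--     if not GAMES:
--         return None
--
--     for key, gctx in GAMES.items():
--         # Match by game string format (e.g., "MIN@GSW")
--         if game_str:
--             home = gctx.get('home_abr', '')
--             away = gctx.get('away_abr', '')
--             if f"{away}@{home}" == game_str or f"{away} @ {home}" == game_str: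
--                 return key
--             # Also match by full names
--             home_name = gctx.get('home', '')
--             away_name = gctx.get('away', '')
--             if game_str in [f"{away_name}@{home_name}", f"{away_name} @ {home_name}",
--                            f"{away}@{home}", key]:
--                 return key
--
--     return game_str  # fallback to original string
-- ===== SOURCE B (Python) =====
-- def _find_game_key(player, game_str, GAMES):
--     """Find the GAMES dict key for a player's game (reverse-index formulation)."""
--     if game_str and game_str in GAMES:
--         return game_str
--     if not GAMES:
--         return None
--     if not game_str:
--         return game_str
--     # Build a reverse-lookup index: alias string -> first GAMES key carrying it.
--     index = {}
--     for key, gctx in GAMES.items():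
--         home = gctx.get('home_abr', '')
--         away = gctx.get('away_abr', '')
--         home_name = gctx.get('home', '')
--         away_name = gctx.get('away', '')
--         for alias in (f"{away}@{home}", f"{away} @ {home}",
--                       f"{away_name}@{home_name}", f"{away_name} @ {home_name}", key):
--             index.setdefault(alias, key)
--     return index.get(game_str, game_str)
-- ===== Notes on version B (the rewrite author's own statement) =====
-- stated objective: alternative
-- what changed: Replaces A's per-entry cascade of f-string comparisons with a reverse-lookup index built once over GAMES.items() (setdefault keeps the first matching key) followed by a single dict lookup with the original string as fallback.
import Mathlib
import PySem

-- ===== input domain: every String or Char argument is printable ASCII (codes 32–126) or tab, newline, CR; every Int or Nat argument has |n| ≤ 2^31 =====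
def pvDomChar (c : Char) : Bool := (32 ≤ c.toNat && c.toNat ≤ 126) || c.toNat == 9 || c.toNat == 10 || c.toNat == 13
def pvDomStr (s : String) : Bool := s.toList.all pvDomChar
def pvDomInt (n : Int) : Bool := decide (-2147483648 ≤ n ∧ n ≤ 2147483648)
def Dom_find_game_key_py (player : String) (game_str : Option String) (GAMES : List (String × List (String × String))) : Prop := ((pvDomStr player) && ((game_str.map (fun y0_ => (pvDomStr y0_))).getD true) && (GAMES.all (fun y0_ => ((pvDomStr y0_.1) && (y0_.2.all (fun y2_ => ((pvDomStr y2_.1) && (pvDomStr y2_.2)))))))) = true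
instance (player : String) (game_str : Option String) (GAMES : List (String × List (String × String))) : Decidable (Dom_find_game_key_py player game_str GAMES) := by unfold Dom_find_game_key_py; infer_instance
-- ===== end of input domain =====

-- B replaces A's early-returning scan (per-entry cascade of alias comparisons) by a reverse-lookup
-- index alias → first key, built once with setdefault, then one lookup; same cost, return value only.

-- ===== PORT A =====
-- A's for-loop over GAMES.items(); returning game_str at the end is the fallback line.
def pvLoopA (game_str : Option String) : List (String × List (String × String)) → Option String
  | [] => game_str
  | (key, gctx) :: rest =>
    match game_str with
    | some gs =>
      if gs == "" then pvLoopA game_str rest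
      else
        let home := (PySem.Dict.mk gctx).getD "home_abr" ""
        let away := (PySem.Dict.mk gctx).getD "away_abr" ""
        if PySem.Str.join "@" [away, home] == gs || PySem.Str.join " @ " [away, home] == gs then some key
        else
          let home_name := (PySem.Dict.mk gctx).getD "home" ""
          let away_name := (PySem.Dict.mk gctx).getD "away" ""
          if [PySem.Str.join "@" [away_name, home_name], PySem.Str.join " @ " [away_name, home_name],
              PySem.Str.join "@" [away, home], key].contains gs
          then some key else pvLoopA game_str rest
    | none => pvLoopA game_str rest

def find_game_key_py (player : String) (game_str : Option String) (GAMES : List (String × List (String × String))) : Option String :=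
  let truthy : Bool := match game_str with | some s => !(s == "") | none => false
  let direct : Bool := match game_str with | some s => (PySem.Dict.mk GAMES).contains s | none => false
  if truthy && direct then game_str
  else if GAMES.isEmpty then none
  else pvLoopA game_str GAMES

-- ===== PORT B =====
-- the five alias strings Source B registers for one (key, gctx) entry
def pvAliases (key : String) (gctx : List (String × String)) : List String :=
  let home := (PySem.Dict.mk gctx).getD "home_abr" ""
  let away := (PySem.Dict.mk gctx).getD "away_abr" ""
  let home_name := (PySem.Dict.mk gctx).getD "home" ""
  let away_name := (PySem.Dict.mk gctx).getD "away" ""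
  [PySem.Str.join "@" [away, home], PySem.Str.join " @ " [away, home],
   PySem.Str.join "@" [away_name, home_name], PySem.Str.join " @ " [away_name, home_name], key]

-- Source B's index-building double loop: alias → first key carrying it (setdefault)
def pvBuildIndex (GAMES : List (String × List (String × String))) : PySem.Dict String String :=
  GAMES.foldl (fun d kg => (pvAliases kg.1 kg.2).foldl (fun d a => d.setdefault a kg.1) d) PySem.Dict.empty

def find_game_key_py_alt (player : String) (game_str : Option String) (GAMES : List (String × List (String × String))) : Option String :=
  let truthy : Bool := match game_str with | some s => !(s == "") | none => false
  let direct : Bool := match game_str with | some s => (PySem.Dict.mk GAMES).contains s | none => false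
  if truthy && direct then game_str
  else if GAMES.isEmpty then none
  else if !truthy then game_str
  else
    match game_str with
    | some gs =>
      match (pvBuildIndex GAMES).get? gs with
      | some k => some k
      | none => game_str
    | none => game_str

-- ===== PRECONDITION & SPEC =====
def Spec_find_game_key_py (player : String) (game_str : Option String) (GAMES : List (String × List (String × String))) (out : Option String) : Prop := out = find_game_key_py_alt player game_str GAMES
instance (player : String) (game_str : Option String) (GAMES : List (String × List (String × String))) (out : Option String) : Decidable (Spec_find_game_key_py player game_str GAMES out) := by unfold Spec_find_game_key_py; infer_instance

-- ===== CLAIM (what is proved, stated in full; the proofs are below) =====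
def Claim_equal_find_game_key_py : Prop := ∀ (player : String) (game_str : Option String) (GAMES : List (String × List (String × String))), Dom_find_game_key_py player game_str GAMES → Spec_find_game_key_py player game_str GAMES (find_game_key_py player game_str GAMES)

-- ===== LEMMAS AND PROOFS =====

-- proof-only helper: the first key of l whose alias list carries gs
def pvFind (gs : String) : List (String × List (String × String)) → Option String
  | [] => none
  | (key, gctx) :: rest => if gs ∈ pvAliases key gctx then some key else pvFind gs rest

theorem pvLoopA_none (l : List (String × List (String × String))) :
    pvLoopA none l = none := by
  induction l with
  | nil => rfl
  | cons kg rest ih => cases kg; simpa [pvLoopA] using ih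

theorem pvLoopA_empty (l : List (String × List (String × String))) :
    pvLoopA (some "") l = some "" := by
  induction l with
  | nil => rfl
  | cons kg rest ih => cases kg; simpa [pvLoopA] using ih

theorem pvLoopA_eq_find (gs : String) (h : gs ≠ "") (l : List (String × List (String × String))) :
    pvLoopA (some gs) l = match pvFind gs l with | some k => some k | none => some gs := by
  induction l with
  | nil => rfl
  | cons kg rest ih =>
    obtain ⟨key, gctx⟩ := kg
    have hb : (gs == "") = false := by simp [h]
    simp only [pvLoopA, pvFind, pvAliases, hb, Bool.false_eq_true, if_false, ih]
    by_cases e1 : gs = PySem.Str.join "@" [(PySem.Dict.mk gctx).getD "away_abr" "", (PySem.Dict.mk gctx).getD "home_abr" ""] <;>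
      by_cases e2 : gs = PySem.Str.join " @ " [(PySem.Dict.mk gctx).getD "away_abr" "", (PySem.Dict.mk gctx).getD "home_abr" ""] <;>
      by_cases e3 : gs = PySem.Str.join "@" [(PySem.Dict.mk gctx).getD "away" "", (PySem.Dict.mk gctx).getD "home" ""] <;>
      by_cases e4 : gs = PySem.Str.join " @ " [(PySem.Dict.mk gctx).getD "away" "", (PySem.Dict.mk gctx).getD "home" ""] <;>
      by_cases e5 : gs = key <;>
      simp_all
    intro hcon
    rcases hcon with hcon | hcon <;> exact absurd hcon.symm (by assumption)

theorem get?_append_single (items : List (String × String)) (a k gs : String) :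
    (PySem.Dict.mk (items ++ [(a, k)])).get? gs =
      match (PySem.Dict.mk items).get? gs with
      | some v => some v
      | none => if gs = a then some k else none := by
  induction items with
  | nil =>
    simp only [List.nil_append, PySem.Dict.get?_mk_cons]
    by_cases h : gs = a
    · subst h; simp [show (PySem.Dict.mk ([] : List (String × String))).get? gs = none from rfl]
    · have h2 : (a == gs) = false := beq_eq_false_iff_ne.mpr (fun hh => h (Eq.symm hh))
      simp [h2, h, show (PySem.Dict.mk ([] : List (String × String))).get? gs = none from rfl]
  | cons p rest ih =>
    rw [List.cons_append]
    obtain ⟨q, w⟩ := p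
    rw [show ((q, w) :: (rest ++ [(a, k)])) = ((q, w) :: (rest ++ [(a, k)])) from rfl]
    simp only [PySem.Dict.get?_mk_cons]
    by_cases h : q = gs
    · simp [h]
    · simp only [beq_iff_eq, h, if_false, ih]

theorem setdefault_get? (d : PySem.Dict String String) (a k gs : String) :
    (d.setdefault a k).get? gs =
      match d.get? gs with
      | some v => some v
      | none => if gs = a then some k else none := by
  by_cases hc : d.contains a = true
  · have hd : d.setdefault a k = d := by simp [PySem.Dict.setdefault, hc]
    rw [hd]
    cases h : d.get? gs with
    | some v => rfl
    | none =>
      by_cases hga : gs = a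
      · subst hga
        rw [PySem.Dict.contains_eq_isSome_get?, h] at hc
        simp at hc
      · simp [hga]
  · have hd : d.setdefault a k = PySem.Dict.mk (d.items ++ [(a, k)]) := by
      simp [PySem.Dict.setdefault, hc]
    rw [hd]
    exact get?_append_single d.items a k gs

theorem fold_setdefault_get? (as : List String) (k : String) (d : PySem.Dict String String) (gs : String) :
    ((as.foldl (fun d a => d.setdefault a k) d).get? gs) =
      match d.get? gs with
      | some v => some v
      | none => if gs ∈ as then some k else none := by
  induction as generalizing d with
  | nil => cases h : d.get? gs <;> simp [h]
  | cons a rest ih =>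
    simp only [List.foldl_cons, ih, setdefault_get?, List.mem_cons]
    cases h : d.get? gs with
    | some v => simp
    | none =>
      by_cases hga : gs = a <;> simp [hga]

theorem buildIndex_get? (gs : String) (l : List (String × List (String × String)))
    (d : PySem.Dict String String) :
    ((l.foldl (fun d kg => (pvAliases kg.1 kg.2).foldl (fun d a => d.setdefault a kg.1) d) d).get? gs) =
      match d.get? gs with
      | some v => some v
      | none => pvFind gs l := by
  induction l generalizing d with
  | nil => simp only [List.foldl_nil, pvFind]; cases h : d.get? gs <;> rfl
  | cons kg rest ih =>
    obtain ⟨key, gctx⟩ := kg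
    simp only [List.foldl_cons, ih, fold_setdefault_get?, pvFind]
    cases h : d.get? gs with
    | some v => simp
    | none => by_cases hm : gs ∈ pvAliases key gctx <;> simp [hm]

-- ===== VERDICT (by name: the statement is the Claim_ definition above) =====
theorem find_game_key_py_spec : Claim_equal_find_game_key_py := by
  intro player game_str GAMES _
  unfold Spec_find_game_key_py find_game_key_py find_game_key_py_alt
  cases game_str with
  | none => simp [pvLoopA_none]
  | some gs =>
    by_cases hgs : gs = ""
    · subst hgs; simp [pvLoopA_empty]
    · have hb : (gs == "") = false := by simp [hgs]
      simp only [hb, Bool.not_false, Bool.true_and, Bool.not_true]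
      by_cases hd : (PySem.Dict.mk GAMES).contains gs
      · simp [hd]
      · simp only [hd, if_false, Bool.false_eq_true]
        by_cases he : GAMES.isEmpty
        · simp [he]
        · simp only [he, if_false, Bool.false_eq_true]
          have hidx : (pvBuildIndex GAMES).get? gs = pvFind gs GAMES := by
            rw [pvBuildIndex, buildIndex_get? gs GAMES]
            simp [show (PySem.Dict.empty : PySem.Dict String String).get? gs = none from rfl]
          rw [pvLoopA_eq_find gs hgs, hidx]
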